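-- pv_equiv track=rewrite | github.com/Calat43/PoemParser | kozmin.py | checkFourthCond
-- ===== SOURCE A (Python) =====
-- def checkFourthCond(line):
--     for id, symbCode in enumerate(line):
--         if ((id + 1) - 1) % 3 == 0:
--             if symbCode != 1 and symbCode != 2 and symbCode != 4:
--                 return False
--             if (id + 1) % 3 == 0:
--                 if symbCode != 1 and symbCode != 2 and symbCode != 3:
--                     return False
--     return True
-- ===== SOURCE B (Python) =====
-- def checkFourthCond(line):
--     rest = line
--     while rest:
--         if rest[0] not in (1, 2, 4):
--             return False
--         rest = rest[3:]
--     return True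
-- ===== Notes on version B (the rewrite author's own statement) =====
-- stated objective: simpler
-- what changed: A's dead inner guard ((id+1)%3==0 can never hold when id%3==0) is dropped and the enumerate-with-mod-guard scan is replaced by a chunked walk that checks the head of the list and jumps ahead three positions with rest = rest[3:].
import Mathlib
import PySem

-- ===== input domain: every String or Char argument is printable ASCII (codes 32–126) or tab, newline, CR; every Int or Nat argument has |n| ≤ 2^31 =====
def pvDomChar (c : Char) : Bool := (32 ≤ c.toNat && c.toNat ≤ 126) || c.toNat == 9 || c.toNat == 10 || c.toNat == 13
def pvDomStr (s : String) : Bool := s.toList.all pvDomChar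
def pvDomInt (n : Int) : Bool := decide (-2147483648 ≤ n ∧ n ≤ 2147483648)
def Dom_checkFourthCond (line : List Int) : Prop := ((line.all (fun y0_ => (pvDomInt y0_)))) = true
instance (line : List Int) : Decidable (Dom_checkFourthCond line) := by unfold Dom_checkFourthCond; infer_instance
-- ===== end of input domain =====

-- ===== PORT A =====
-- B drops A's dead inner guard and walks the list in chunks of three instead of guarding every index with a mod test (objective: simpler).
def checkFourthCondLoop : List (Int × Int) → Bool
  | [] => true
  | (id, symbCode) :: rest =>
    if PySem.Int.mod ((id + 1) - 1) 3 == 0 then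
      if symbCode ≠ 1 ∧ symbCode ≠ 2 ∧ symbCode ≠ 4 then false
      else if PySem.Int.mod (id + 1) 3 == 0 then
        if symbCode ≠ 1 ∧ symbCode ≠ 2 ∧ symbCode ≠ 3 then false
        else checkFourthCondLoop rest
      else checkFourthCondLoop rest
    else checkFourthCondLoop rest

def checkFourthCond (line : List Int) : Bool :=
  checkFourthCondLoop (PySem.List.enumerate line)

-- ===== PORT B =====
def checkFourthCondChunk (rest : List Int) : Bool :=
  match rest with
  | [] => true
  | x :: xs =>
    if x = 1 ∨ x = 2 ∨ x = 4 then
      checkFourthCondChunk (PySem.List.slice (x :: xs) (some 3) none)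
    else false
termination_by rest.length
decreasing_by
  rw [PySem.List.slice_from _ (by omega)]
  simp

def checkFourthCond_alt (line : List Int) : Bool :=
  checkFourthCondChunk line

-- ===== PRECONDITION & SPEC =====
def Spec_checkFourthCond (line : List Int) (out : Bool) : Prop := out = checkFourthCond_alt line
instance (line : List Int) (out : Bool) : Decidable (Spec_checkFourthCond line out) := by unfold Spec_checkFourthCond; infer_instance

-- ===== CLAIM (what is proved, stated in full; the proofs are below) =====
def Claim_equal_checkFourthCond : Prop := ∀ (line : List Int), Dom_checkFourthCond line → Spec_checkFourthCond line (checkFourthCond line)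

-- ===== LEMMAS AND PROOFS =====
lemma chunk_cons (x : Int) (xs : List Int) :
    checkFourthCondChunk (x :: xs) =
      if x = 1 ∨ x = 2 ∨ x = 4 then checkFourthCondChunk (xs.drop 2) else false := by
  rw [checkFourthCondChunk]
  rw [PySem.List.slice_from _ (by omega)]
  rfl

lemma loop_chunk (n : Nat) : ∀ (xs : List Int) (s : Int), xs.length ≤ n → 0 ≤ s → s % 3 = 0 →
    checkFourthCondLoop (PySem.List.enumerate xs s) = checkFourthCondChunk xs := by
  induction n with
  | zero =>
    intro xs s hlen _ _
    have : xs = [] := by cases xs <;> simp_all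
    subst this
    simp [PySem.List.enumerate, checkFourthCondLoop, checkFourthCondChunk]
  | succ n ih =>
    intro xs s hlen hs hmod
    match xs with
    | [] => simp [PySem.List.enumerate, checkFourthCondLoop, checkFourthCondChunk]
    | x :: xs =>
      rw [PySem.List.enumerate_cons, checkFourthCondLoop, chunk_cons]
      have h0 : PySem.Int.mod ((s + 1) - 1) 3 = 0 := by
        rw [PySem.Int.mod_eq_emod_of_pos (by omega)]; omega
      rw [h0]
      simp only [BEq.rfl, if_true]
      by_cases hx : x = 1 ∨ x = 2 ∨ x = 4
      · have hne : ¬ (x ≠ 1 ∧ x ≠ 2 ∧ x ≠ 4) := by tauto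
        rw [if_neg hne, if_pos hx]
        have h1 : (PySem.Int.mod (s + 1) 3 == 0) = false := by
          rw [PySem.Int.mod_eq_emod_of_pos (by omega)]
          simp only [beq_eq_false_iff_ne, ne_eq]
          omega
        rw [h1]
        simp only [Bool.false_eq_true, if_false]
        match xs with
        | [] => simp [PySem.List.enumerate, checkFourthCondLoop, checkFourthCondChunk]
        | b :: [] =>
          rw [PySem.List.enumerate_cons, checkFourthCondLoop]
          have hb : (PySem.Int.mod ((s + 1 + 1) - 1) 3 == 0) = false := by
            rw [PySem.Int.mod_eq_emod_of_pos (by omega)]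
            simp only [beq_eq_false_iff_ne, ne_eq]
            omega
          rw [hb]
          simp [PySem.List.enumerate, checkFourthCondLoop, checkFourthCondChunk]
        | b :: c :: rest =>
          rw [PySem.List.enumerate_cons, checkFourthCondLoop]
          have hb : (PySem.Int.mod ((s + 1 + 1) - 1) 3 == 0) = false := by
            rw [PySem.Int.mod_eq_emod_of_pos (by omega)]
            simp only [beq_eq_false_iff_ne, ne_eq]
            omega
          rw [hb]
          simp only [Bool.false_eq_true, if_false]
          rw [PySem.List.enumerate_cons, checkFourthCondLoop]
          have hc : (PySem.Int.mod ((s + 1 + 1 + 1) - 1) 3 == 0) = false := by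
            rw [PySem.Int.mod_eq_emod_of_pos (by omega)]
            simp only [beq_eq_false_iff_ne, ne_eq]
            omega
          rw [hc]
          simp only [Bool.false_eq_true, if_false, List.drop]
          exact ih rest (s + 1 + 1 + 1) (by simp at hlen ⊢; omega) (by omega) (by omega)
      · have hne : x ≠ 1 ∧ x ≠ 2 ∧ x ≠ 4 := by tauto
        rw [if_pos hne, if_neg hx]

-- ===== VERDICT (by name: the statement is the Claim_ definition above) =====
theorem checkFourthCond_spec : Claim_equal_checkFourthCond := by
  intro line _
  unfold Spec_checkFourthCond checkFourthCond checkFourthCond_alt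
  exact loop_chunk line.length line 0 le_rfl le_rfl rfl
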